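-- pv_equiv track=rewrite | github.com/couchbase/testrunner | scripts/merge_reports.py | compare_with_sort
-- ===== SOURCE A (Python) =====
-- def compare_with_sort(dict, key):
--     key_split = key.split(',')
--     key = '%s,%s' % (key_split[0], ','.join(sorted(key_split[1:])))
--     for k in dict.keys():
--         test_case_split = k.split(',')
--         test_case = "%s,%s" % (test_case_split[0],
--                                ",".join(sorted(test_case_split[1:])))
--         if key == test_case:
--             return True, k
--
--     return False, None
-- ===== SOURCE B (Python) =====
-- def compare_with_sort(dict, key):
--     def _norm(s):
--         parts = s.split(',')
--         return '%s,%s' % (parts[0], ','.join(sorted(parts[1:])))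
--     table = {}
--     for k in dict.keys():
--         table.setdefault(_norm(k), k)
--     norm_key = _norm(key)
--     if norm_key in table:
--         return True, table[norm_key]
--     return False, None
-- ===== Notes on version B (the rewrite author's own statement) =====
-- stated objective: alternative
-- what changed: B replaces A's early-return scan that re-normalizes each key inline with a different decomposition: it builds a normalized-key index in one pass with setdefault (first key per normalized form wins, matching A's first-match semantics) and answers by a single dict lookup.
import Mathlib
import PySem

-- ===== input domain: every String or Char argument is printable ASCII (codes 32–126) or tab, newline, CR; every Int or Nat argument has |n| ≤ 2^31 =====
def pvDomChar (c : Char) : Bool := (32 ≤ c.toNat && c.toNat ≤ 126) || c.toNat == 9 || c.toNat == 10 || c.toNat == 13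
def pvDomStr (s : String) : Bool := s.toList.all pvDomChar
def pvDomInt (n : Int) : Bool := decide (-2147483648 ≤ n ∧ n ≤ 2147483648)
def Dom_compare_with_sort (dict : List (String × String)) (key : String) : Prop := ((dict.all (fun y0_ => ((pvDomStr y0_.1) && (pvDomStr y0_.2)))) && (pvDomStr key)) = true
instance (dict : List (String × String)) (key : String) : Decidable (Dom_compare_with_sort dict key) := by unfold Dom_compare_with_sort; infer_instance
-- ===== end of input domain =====

-- B builds a normalized-key index with setdefault and answers by one lookup instead of A's rescanning early-return loop (objective: alternative decomposition).

-- ===== PORT A =====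
-- '%s,%s' % (split[0], ','.join(sorted(split[1:])))
def pvNormA (s : String) : String :=
  let ps := (PySem.Str.split? s ",").getD []
  PySem.Str.join "," [ps.headD "", PySem.Str.join "," (PySem.List.sorted (ps.drop 1) (fun x => x) false)]

-- A's for-loop with early return
def pvScanA (nk : String) : List (String × String) → Bool × Option String
  | [] => (false, none)
  | (k, _) :: rest => if nk = pvNormA k then (true, some k) else pvScanA nk rest

def compare_with_sort (dict : List (String × String)) (key : String) : Bool × Option String :=
  pvScanA (pvNormA key) dict

-- ===== PORT B =====
def pvNormB (s : String) : String :=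
  let ps := (PySem.Str.split? s ",").getD []
  PySem.Str.join "," [ps.headD "", PySem.Str.join "," (PySem.List.sorted (ps.drop 1) (fun x => x) false)]

-- table.setdefault(_norm(k), k) over dict.keys()
def pvBuildB (dict : List (String × String)) : PySem.Dict String String :=
  dict.foldl (fun t p => t.setdefault (pvNormB p.1) p.1) PySem.Dict.empty

def compare_with_sort_alt (dict : List (String × String)) (key : String) : Bool × Option String :=
  let table := pvBuildB dict
  match table.get? (pvNormB key) with
  | some k => (true, some k)
  | none => (false, none)

-- ===== PRECONDITION & SPEC =====
def Spec_compare_with_sort (dict : List (String × String)) (key : String) (out : Bool × Option String) : Prop := out = compare_with_sort_alt dict key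
instance (dict : List (String × String)) (key : String) (out : Bool × Option String) : Decidable (Spec_compare_with_sort dict key out) := by unfold Spec_compare_with_sort; infer_instance

-- ===== CLAIM (what is proved, stated in full; the proofs are below) =====
def Claim_equal_compare_with_sort : Prop := ∀ (dict : List (String × String)) (key : String), Dom_compare_with_sort dict key → Spec_compare_with_sort dict key (compare_with_sort dict key)

-- ===== LEMMAS AND PROOFS =====

theorem pvNorm_eq : pvNormB = pvNormA := rfl

-- the index lookup equals "first value already in t, else A's scan result"
theorem pvBuild_get (l : List (String × String)) (t : PySem.Dict String String) (nk : String) :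
    (l.foldl (fun t p => t.setdefault (pvNormB p.1) p.1) t).get? nk
      = match t.get? nk with
        | some v => some v
        | none => (pvScanA nk l).2 := by
  induction l generalizing t with
  | nil => cases h : t.get? nk <;> simp [pvScanA, h]
  | cons p rest ih =>
    simp only [List.foldl_cons]
    rw [ih]
    by_cases hc : t.contains (pvNormB p.1) = true
    · rw [PySem.Dict.setdefault_of_contains _ _ hc]
      cases h : t.get? nk with
      | some v => simp
      | none =>
        by_cases he : nk = pvNormA p.1
        · exfalso
          rw [PySem.Dict.contains_eq_isSome_get?] at hc
          rw [pvNorm_eq, ← he, h] at hc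
          simp at hc
        · cases p with
          | mk k v => simp [pvScanA, he]
    · rw [PySem.Dict.setdefault_of_not_contains _ _ (by simpa using hc)]
      rw [PySem.Dict.get?_insert]
      by_cases he : nk = pvNormB p.1
      · rw [if_pos he]
        have ht : t.get? nk = none := by
          rw [PySem.Dict.contains_eq_isSome_get?] at hc
          rw [← he] at hc
          cases h : t.get? nk <;> simp [h] at hc ⊢
        rw [ht]
        cases p with
        | mk k v => simp [pvScanA, ← pvNorm_eq, he]
      · rw [if_neg he]
        cases h : t.get? nk with
        | some v => simp
        | none =>
          cases p with
          | mk k v =>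
            simp only [pvScanA]
            rw [if_neg (by rw [← pvNorm_eq]; exact he)]

-- A's pair is determined by its second component
theorem pvScanA_shape (nk : String) (l : List (String × String)) :
    pvScanA nk l = match (pvScanA nk l).2 with
      | some k => (true, some k)
      | none => (false, none) := by
  induction l with
  | nil => rfl
  | cons p rest ih =>
    cases p with
    | mk k v =>
      simp only [pvScanA]
      by_cases h : nk = pvNormA k
      · rw [if_pos h]
      · rw [if_neg h]; exact ih

-- ===== VERDICT (by name: the statement is the Claim_ definition above) =====
theorem compare_with_sort_spec : Claim_equal_compare_with_sort := by
  intro dict key _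
  show pvScanA (pvNormA key) dict =
    match (List.foldl (fun t p => t.setdefault (pvNormB p.1) p.1) PySem.Dict.empty dict).get? (pvNormB key) with
    | some k => (true, some k)
    | none => (false, none)
  have h := pvBuild_get dict PySem.Dict.empty (pvNormB key)
  rw [PySem.Dict.get?_empty] at h
  rw [h, pvNorm_eq]
  exact pvScanA_shape _ _
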